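-- pv_equiv track=rewrite | github.com/gietema/adventofcode2021 | days/day_08.py | _build_easy_options_dict
-- ===== SOURCE A (Python) =====
-- def _build_easy_options_dict(digits: list[str]):
--     options_dict = {}
--     nr_segments = [len(digit) for digit in digits]
--     if 2 in nr_segments:  # 1
--         idx = nr_segments.index(2)
--         options_dict[1] = set(digits[idx])
--     if 3 in nr_segments:  # 7
--         idx = nr_segments.index(3)
--         options_dict[7] = set(digits[idx])
--     if 4 in nr_segments:  # 4
--         idx = nr_segments.index(4)
--         options_dict[4] = set(digits[idx])
--     if 7 in nr_segments:  # 8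
--         idx = nr_segments.index(7)
--         options_dict[8] = set(digits[idx])
--     return options_dict
-- ===== SOURCE B (Python) =====
-- def _build_easy_options_dict(digits: list[str]):
--     # Sort-then-scan: stable-sort the digits by length, then walk the sorted
--     # list once and take the head of each run of equal lengths (stability makes
--     # that head the first occurrence in the original list); runs appear in
--     # ascending length order 2,3,4,7, i.e. digit order 1,7,4,8.
--     table = {2: 1, 3: 7, 4: 4, 7: 8}
--     options_dict = {}
--     prev = None
--     for d in sorted(digits, key=len):
--         length = len(d)
--         if length != prev and length in table:
--             options_dict[table[length]] = set(d)
--         prev = length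
--     return options_dict
-- ===== Notes on version B (the rewrite author's own statement) =====
-- stated objective: alternative
-- what changed: Replaces A's four membership tests plus .index scans over a precomputed length list with a stable sort of the digits by length followed by one scan that takes the head of each run of equal lengths (stability makes it the first occurrence; runs ascend 2,3,4,7 = digit order 1,7,4,8).
import Mathlib
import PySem

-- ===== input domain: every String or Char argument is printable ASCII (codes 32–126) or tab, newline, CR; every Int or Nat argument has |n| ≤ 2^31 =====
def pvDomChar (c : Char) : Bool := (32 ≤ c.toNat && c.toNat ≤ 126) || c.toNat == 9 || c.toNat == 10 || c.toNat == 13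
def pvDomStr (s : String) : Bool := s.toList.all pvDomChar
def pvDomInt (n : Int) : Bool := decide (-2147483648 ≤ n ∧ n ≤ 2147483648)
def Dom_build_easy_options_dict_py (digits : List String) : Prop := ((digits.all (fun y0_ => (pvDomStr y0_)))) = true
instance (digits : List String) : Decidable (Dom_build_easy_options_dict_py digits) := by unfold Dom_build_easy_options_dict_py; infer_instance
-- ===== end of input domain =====

-- B replaces A's four membership-plus-.index scans over a length list by a stable sort of the
-- digits by length followed by one scan taking the head of each run of equal lengths
-- (objective: alternative).

-- Python len(d) on a string, as an Int
def pvLen (d : String) : Int := (PySem.Str.len d : Int)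

-- set(s) on a Python string: the distinct characters, as 1-char strings, in first-occurrence order
def pySetStr (s : String) : List String :=
  PySem.Set.ofList (s.toList.map (fun c => String.ofList [c]))

-- ===== PORT A =====
def build_easy_options_dict_py (digits : List String) : List (Int × List String) :=
  let nr_segments : List Int := digits.map pvLen
  let od : PySem.Dict Int (List String) := PySem.Dict.empty
  let od := match PySem.List.index? nr_segments 2 with
    | some idx => od.insert 1 (pySetStr (digits.getD idx ""))
    | none => od
  let od := match PySem.List.index? nr_segments 3 with
    | some idx => od.insert 7 (pySetStr (digits.getD idx ""))
    | none => od
  let od := match PySem.List.index? nr_segments 4 with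
    | some idx => od.insert 4 (pySetStr (digits.getD idx ""))
    | none => od
  let od := match PySem.List.index? nr_segments 7 with
    | some idx => od.insert 8 (pySetStr (digits.getD idx ""))
    | none => od
  od.items

-- ===== PORT B =====
-- the fixed table {2: 1, 3: 7, 4: 4, 7: 8}
def pvTbl : PySem.Dict Int Int := PySem.Dict.ofList [(2, 1), (3, 7), (4, 4), (7, 8)]

-- the body of B's single for-loop over the sorted list: state = (options_dict, prev)
def pvStep (st : PySem.Dict Int (List String) × Option Int) (d : String) :
    PySem.Dict Int (List String) × Option Int :=
  if (some (pvLen d) != st.2) && pvTbl.contains (pvLen d)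
  then (st.1.insert (pvTbl.getD (pvLen d) 0) (pySetStr d), some (pvLen d))
  else (st.1, some (pvLen d))

def build_easy_options_dict_py_alt (digits : List String) : List (Int × List String) :=
  ((PySem.List.sorted digits pvLen false).foldl pvStep (PySem.Dict.empty, none)).1.items

-- ===== PRECONDITION & SPEC =====
def Spec_build_easy_options_dict_py (digits : List String) (out : List (Int × List String)) : Prop := out = build_easy_options_dict_py_alt digits
instance (digits : List String) (out : List (Int × List String)) : Decidable (Spec_build_easy_options_dict_py digits out) := by unfold Spec_build_easy_options_dict_py; infer_instance

-- ===== CLAIM (what is proved, stated in full; the proofs are below) =====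
def Claim_equal_build_easy_options_dict_py : Prop := ∀ (digits : List String), Dom_build_easy_options_dict_py digits → Spec_build_easy_options_dict_py digits (build_easy_options_dict_py digits)

-- ===== LEMMAS AND PROOFS =====

-- 'the first digit of length L, inserted under its table key' — the common shape of one step of
-- either program, used to characterise both
def pvUpd (s : List String) (L : Int) (d : PySem.Dict Int (List String)) :
    PySem.Dict Int (List String) :=
  match s.find? (fun x => pvLen x == L) with
  | some x => d.insert (pvTbl.getD L 0) (pySetStr x)
  | none => d

-- pvUpd guarded by the 'prev' value of B's loop
def pvG (s : List String) (p : Option Int) (L : Int) (d : PySem.Dict Int (List String)) :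
    PySem.Dict Int (List String) :=
  if p = some L then d else pvUpd s L d

-- the chain of guarded updates at the four easy lengths, in ascending order
def pvChainP (s : List String) (p : Option Int) (d : PySem.Dict Int (List String)) :
    PySem.Dict Int (List String) :=
  pvG s p 7 (pvG s p 4 (pvG s p 3 (pvG s p 2 d)))

theorem pvTbl_contains_false (L : Int) (h2 : L ≠ 2) (h3 : L ≠ 3) (h4 : L ≠ 4) (h7 : L ≠ 7) :
    pvTbl.contains L = false := by
  rw [PySem.Dict.contains_eq_isSome_get?]
  simp [show pvTbl = PySem.Dict.mk [(2, 1), (3, 7), (4, 4), (7, 8)] from rfl,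
    PySem.Dict.get?_mk_cons, Ne.symm h2, Ne.symm h3, Ne.symm h4, Ne.symm h7]
  rfl

theorem pv_find?_none_of_lt (s : List String) (L : Int) (h : ∀ y ∈ s, L < pvLen y) :
    s.find? (fun x => pvLen x == L) = none := by
  rw [List.find?_eq_none]
  intro x hx
  simpa using (h x hx).ne'

theorem pvUpd_id_of_lt (s : List String) (L : Int) (d : PySem.Dict Int (List String))
    (h : ∀ y ∈ s, L < pvLen y) : pvUpd s L d = d := by
  unfold pvUpd
  rw [pv_find?_none_of_lt s L h]

theorem pvUpd_cons_ne (x : String) (s : List String) (L : Int)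
    (d : PySem.Dict Int (List String)) (h : pvLen x ≠ L) :
    pvUpd (x :: s) L d = pvUpd s L d := by
  unfold pvUpd
  rw [List.find?_cons_of_neg]
  simp [h]

theorem pvUpd_cons_self (x : String) (s : List String) (d : PySem.Dict Int (List String)) :
    pvUpd (x :: s) (pvLen x) d = d.insert (pvTbl.getD (pvLen x) 0) (pySetStr x) := by
  unfold pvUpd
  rw [List.find?_cons_of_pos]
  simp

theorem pvG_skip (s : List String) (L : Int) (d : PySem.Dict Int (List String)) :
    pvG s (some L) L d = d := by simp [pvG]

theorem pvG_ne (s : List String) (p : Option Int) (L : Int) (d : PySem.Dict Int (List String))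
    (h : p ≠ some L) : pvG s p L d = pvUpd s L d := by simp [pvG, h]

theorem pvG_id_of_lt (s : List String) (p : Option Int) (L : Int)
    (d : PySem.Dict Int (List String)) (h : ∀ y ∈ s, L < pvLen y) : pvG s p L d = d := by
  unfold pvG
  split
  · rfl
  · exact pvUpd_id_of_lt s L d h

-- a non-head layer of the chain is the same before and after one step of B's loop
theorem pvG_both (x : String) (rest : List String) (p : Option Int) (L : Int)
    (d : PySem.Dict Int (List String))
    (hrest : ∀ y ∈ rest, pvLen x ≤ pvLen y)
    (hxL : pvLen x ≠ L)
    (hp : ∀ v, p = some v → v ≤ pvLen x) :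
    pvG (x :: rest) p L d = pvG rest (some (pvLen x)) L d := by
  rcases lt_or_gt_of_ne hxL with hlt | hgt
  · have hpne : p ≠ some L := by
      intro hpe
      have := hp L hpe
      omega
    have hxne : (some (pvLen x) : Option Int) ≠ some L := by
      intro h
      injection h with h
      omega
    rw [pvG_ne _ _ _ _ hpne, pvG_ne _ _ _ _ hxne]
    exact pvUpd_cons_ne x rest L d hxL
  · have h1 : ∀ y ∈ x :: rest, L < pvLen y := by
      intro y hy
      rcases List.mem_cons.mp hy with h | h
      · subst h; omega
      · have := hrest y h; omega
    rw [pvG_id_of_lt _ _ _ _ h1,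
      pvG_id_of_lt _ _ _ _ (fun y hy => lt_of_lt_of_le hgt (hrest y hy))]

theorem pvG_cons_prev (x : String) (rest : List String) (L : Int)
    (d : PySem.Dict Int (List String)) :
    pvG (x :: rest) (some (pvLen x)) L d = pvG rest (some (pvLen x)) L d := by
  by_cases hL : pvLen x = L
  · subst hL
    rw [pvG_skip, pvG_skip]
  · have hne : (some (pvLen x) : Option Int) ≠ some L := by
      intro h; injection h with h; exact hL h
    rw [pvG_ne _ _ _ _ hne, pvG_ne _ _ _ _ hne]
    exact pvUpd_cons_ne x rest L d hL

theorem pvChainP_nil (p : Option Int) (d : PySem.Dict Int (List String)) :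
    pvChainP [] p d = d := by
  simp [pvChainP, pvG, pvUpd]

-- B's loop over a length-sorted list computes the chain of guarded first-occurrence updates
theorem pvFold_chain : ∀ (n : Nat) (s : List String), s.length ≤ n →
    s.Pairwise (fun a b => pvLen a ≤ pvLen b) →
    ∀ (d : PySem.Dict Int (List String)) (p : Option Int),
      (∀ v, p = some v → ∀ x ∈ s, v ≤ pvLen x) →
      (s.foldl pvStep (d, p)).1 = pvChainP s p d := by
  intro n
  induction n with
  | zero =>
    intro s hlen _ d p _
    have hs : s = [] := List.eq_nil_of_length_eq_zero (Nat.le_zero.mp hlen)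
    subst hs
    rw [pvChainP_nil]
    rfl
  | succ n ih =>
    intro s hlen hpair d p hp
    cases s with
    | nil => rw [pvChainP_nil]; rfl
    | cons x rest =>
      rw [List.pairwise_cons] at hpair
      obtain ⟨hx, hrest⟩ := hpair
      have hlen' : rest.length ≤ n := by simpa using Nat.succ_le_succ_iff.mp hlen
      have hp' : ∀ v, p = some v → v ≤ pvLen x := fun v hv => hp v hv x (by simp)
      rw [List.foldl_cons]
      by_cases hpe : p = some (pvLen x)
      · have hstep : pvStep (d, p) x = (d, some (pvLen x)) := by
          simp [pvStep, hpe]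
        rw [hstep,
          ih rest hlen' hrest d (some (pvLen x))
            (fun v hv y hy => by injection hv with hv; subst hv; exact hx y hy),
          hpe]
        unfold pvChainP
        rw [pvG_cons_prev, pvG_cons_prev, pvG_cons_prev, pvG_cons_prev]
      · have hbne : (some (pvLen x) != p) = true := by
          simp [bne_iff_ne]
          exact fun h => hpe h.symm
        cases hc : pvTbl.contains (pvLen x) with
        | false =>
          have hstep : pvStep (d, p) x = (d, some (pvLen x)) := by
            simp [pvStep, hc]
          have hne2 : pvLen x ≠ 2 := fun h => absurd hc (by rw [h]; decide)
          have hne3 : pvLen x ≠ 3 := fun h => absurd hc (by rw [h]; decide)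
          have hne4 : pvLen x ≠ 4 := fun h => absurd hc (by rw [h]; decide)
          have hne7 : pvLen x ≠ 7 := fun h => absurd hc (by rw [h]; decide)
          rw [hstep,
            ih rest hlen' hrest d (some (pvLen x))
              (fun v hv y hy => by injection hv with hv; subst hv; exact hx y hy)]
          unfold pvChainP
          rw [pvG_both x rest p 2 _ hx hne2 hp', pvG_both x rest p 3 _ hx hne3 hp',
            pvG_both x rest p 4 _ hx hne4 hp', pvG_both x rest p 7 _ hx hne7 hp']
        | true =>
          have hstep : pvStep (d, p) x =
              (d.insert (pvTbl.getD (pvLen x) 0) (pySetStr x), some (pvLen x)) := by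
            simp [pvStep, hc, hbne]
          rw [hstep,
            ih rest hlen' hrest (d.insert (pvTbl.getD (pvLen x) 0) (pySetStr x))
              (some (pvLen x))
              (fun v hv y hy => by injection hv with hv; subst hv; exact hx y hy)]
          -- the length of x is one of the four table keys
          have hins : pvUpd (x :: rest) (pvLen x) d =
              d.insert (pvTbl.getD (pvLen x) 0) (pySetStr x) := pvUpd_cons_self x rest d
          by_cases h2 : pvLen x = 2
          · have hkey : p ≠ some (2 : Int) := by rw [h2] at hpe; exact hpe
            have hhead : pvG (x :: rest) p 2 d = d.insert (pvTbl.getD 2 0) (pySetStr x) := by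
              rw [pvG_ne _ _ _ _ hkey, ← h2]
              exact hins
            have hb : ∀ L : Int, pvLen x ≠ L → ∀ dd,
                pvG (x :: rest) p L dd = pvG rest (some (2 : Int)) L dd :=
              fun L hL dd => by rw [pvG_both x rest p L dd hx hL hp', h2]
            rw [h2]
            unfold pvChainP
            rw [pvG_skip, hb 3 (by omega), hb 4 (by omega), hb 7 (by omega), hhead]
          · by_cases h3 : pvLen x = 3
            · have hkey : p ≠ some (3 : Int) := by rw [h3] at hpe; exact hpe
              have hhead : pvG (x :: rest) p 3 d = d.insert (pvTbl.getD 3 0) (pySetStr x) := by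
                rw [pvG_ne _ _ _ _ hkey, ← h3]
                exact hins
              have hb : ∀ L : Int, pvLen x ≠ L → ∀ dd,
                  pvG (x :: rest) p L dd = pvG rest (some (3 : Int)) L dd :=
                fun L hL dd => by rw [pvG_both x rest p L dd hx hL hp', h3]
              have hlt : ∀ L : Int, L < 3 → ∀ dd, pvG rest (some (3 : Int)) L dd = dd :=
                fun L hLc dd => pvG_id_of_lt _ _ _ _ (fun y hy => by have := hx y hy; omega)
              have hlt' : ∀ L : Int, L < 3 → ∀ dd, pvG (x :: rest) p L dd = dd :=
                fun L hLc dd => pvG_id_of_lt _ _ _ _ (by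
                  intro y hy
                  rcases List.mem_cons.mp hy with h | h
                  · subst h; omega
                  · have := hx y h; omega)
              rw [h3]
              unfold pvChainP
              rw [hlt 2 (by omega), hlt' 2 (by omega), pvG_skip, hb 4 (by omega),
                hb 7 (by omega), hhead]
            · by_cases h4 : pvLen x = 4
              · have hkey : p ≠ some (4 : Int) := by rw [h4] at hpe; exact hpe
                have hhead : pvG (x :: rest) p 4 d = d.insert (pvTbl.getD 4 0) (pySetStr x) := by
                  rw [pvG_ne _ _ _ _ hkey, ← h4]
                  exact hins
                have hb : ∀ L : Int, pvLen x ≠ L → ∀ dd,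
                    pvG (x :: rest) p L dd = pvG rest (some (4 : Int)) L dd :=
                  fun L hL dd => by rw [pvG_both x rest p L dd hx hL hp', h4]
                have hlt : ∀ L : Int, L < 4 → ∀ dd, pvG rest (some (4 : Int)) L dd = dd :=
                  fun L hLc dd => pvG_id_of_lt _ _ _ _ (fun y hy => by have := hx y hy; omega)
                have hlt' : ∀ L : Int, L < 4 → ∀ dd, pvG (x :: rest) p L dd = dd :=
                  fun L hLc dd => pvG_id_of_lt _ _ _ _ (by
                    intro y hy
                    rcases List.mem_cons.mp hy with h | h
                    · subst h; omega
                    · have := hx y h; omega)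
                rw [h4]
                unfold pvChainP
                rw [hlt 2 (by omega), hlt 3 (by omega), hlt' 2 (by omega), hlt' 3 (by omega),
                  pvG_skip, hb 7 (by omega), hhead]
              · have h7 : pvLen x = 7 := by
                  by_contra h7
                  exact absurd hc (by rw [pvTbl_contains_false _ h2 h3 h4 h7]; decide)
                have hkey : p ≠ some (7 : Int) := by rw [h7] at hpe; exact hpe
                have hhead : pvG (x :: rest) p 7 d = d.insert (pvTbl.getD 7 0) (pySetStr x) := by
                  rw [pvG_ne _ _ _ _ hkey, ← h7]
                  exact hins
                have hlt : ∀ L : Int, L < 7 → ∀ dd, pvG rest (some (7 : Int)) L dd = dd :=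
                  fun L hLc dd => pvG_id_of_lt _ _ _ _ (fun y hy => by have := hx y hy; omega)
                have hlt' : ∀ L : Int, L < 7 → ∀ dd, pvG (x :: rest) p L dd = dd :=
                  fun L hLc dd => pvG_id_of_lt _ _ _ _ (by
                    intro y hy
                    rcases List.mem_cons.mp hy with h | h
                    · subst h; omega
                    · have := hx y h; omega)
                rw [h7]
                unfold pvChainP
                rw [hlt 2 (by omega), hlt 3 (by omega), hlt 4 (by omega), hlt' 2 (by omega),
                  hlt' 3 (by omega), hlt' 4 (by omega), pvG_skip, hhead]

-- STABILITY of the sort: the sublist of digits of one given length is unchanged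
theorem pv_filter_insertBy (x : String) (ys : List String) (L : Int)
    (hys : ys.Pairwise (fun a b => pvLen a ≤ pvLen b)) :
    (PySem.List.insertBy (fun a b => decide (pvLen a < pvLen b)) x ys).filter
        (fun y => pvLen y == L) =
      if pvLen x = L then ys.filter (fun y => pvLen y == L) ++ [x]
      else ys.filter (fun y => pvLen y == L) := by
  induction ys with
  | nil =>
    rw [show PySem.List.insertBy (fun a b => decide (pvLen a < pvLen b)) x [] = [x] from rfl]
    by_cases h : pvLen x = L <;> simp [h]
  | cons y ys ih =>
    rw [List.pairwise_cons] at hys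
    obtain ⟨hy, hys'⟩ := hys
    have hcons : PySem.List.insertBy (fun a b => decide (pvLen a < pvLen b)) x (y :: ys) =
        if decide (pvLen x < pvLen y) = true then x :: y :: ys
        else y :: PySem.List.insertBy (fun a b => decide (pvLen a < pvLen b)) x ys := rfl
    rw [hcons]
    by_cases hlt : pvLen x < pvLen y
    · rw [if_pos (by simpa using hlt)]
      by_cases h : pvLen x = L
      · have hnil : (y :: ys).filter (fun z => pvLen z == L) = [] := by
          rw [List.filter_eq_nil_iff]
          intro z hz
          have : pvLen y ≤ pvLen z := by
            rcases List.mem_cons.mp hz with hh | hh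
            · subst hh; exact le_refl _
            · exact hy z hh
          simp only [beq_iff_eq]
          omega
        rw [if_pos h, List.filter_cons]
        simp [h, hnil]
      · rw [if_neg h, List.filter_cons]
        simp [h]
    · rw [if_neg (by simpa using hlt)]
      rw [List.filter_cons, List.filter_cons, ih hys']
      by_cases h : pvLen x = L <;> by_cases hyL : pvLen y = L <;>
        simp [h, hyL]

theorem pv_filter_sorted (digits : List String) (L : Int) :
    (PySem.List.sorted digits pvLen false).filter (fun y => pvLen y == L) =
      digits.filter (fun y => pvLen y == L) := by
  induction digits using List.reverseRecOn with
  | nil => rfl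
  | append_singleton xs x ih =>
    have hsort : PySem.List.sorted (xs ++ [x]) pvLen false =
        PySem.List.insertBy (fun a b => decide (pvLen a < pvLen b)) x
          (PySem.List.sorted xs pvLen false) := by
      rw [PySem.List.sorted_eq_foldl_insertBy, PySem.List.sorted_eq_foldl_insertBy,
        List.foldl_append]
      rfl
    rw [hsort, pv_filter_insertBy x _ L (PySem.List.sorted_pairwise xs pvLen),
      List.filter_append, ih]
    by_cases h : pvLen x = L <;> simp [h]

theorem pv_find?_sorted (digits : List String) (L : Int) :
    (PySem.List.sorted digits pvLen false).find? (fun x => pvLen x == L) =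
      digits.find? (fun x => pvLen x == L) := by
  rw [← List.head?_filter, ← List.head?_filter, pv_filter_sorted]

theorem pvUpd_sorted (digits : List String) (L : Int) (d : PySem.Dict Int (List String)) :
    pvUpd (PySem.List.sorted digits pvLen false) L d = pvUpd digits L d := by
  unfold pvUpd
  rw [pv_find?_sorted]

theorem pvChainP_sorted (digits : List String) (d : PySem.Dict Int (List String)) :
    pvChainP (PySem.List.sorted digits pvLen false) none d = pvChainP digits none d := by
  have hne : ∀ L : Int, (none : Option Int) ≠ some L := fun L h => by injection h
  unfold pvChainP
  rw [pvG_ne _ _ _ _ (hne 2), pvG_ne _ _ _ _ (hne 3), pvG_ne _ _ _ _ (hne 4),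
    pvG_ne _ _ _ _ (hne 7), pvG_ne _ _ _ _ (hne 2), pvG_ne _ _ _ _ (hne 3),
    pvG_ne _ _ _ _ (hne 4), pvG_ne _ _ _ _ (hne 7),
    pvUpd_sorted, pvUpd_sorted, pvUpd_sorted, pvUpd_sorted]

-- A's 'if v in nr_segments: idx = nr_segments.index(v); digits[idx]' is the first digit of length v
theorem index?_map_len_eq_find? (digits : List String) (v : Int) :
    (PySem.List.index? (digits.map pvLen) v).map (fun idx => digits.getD idx "") =
    digits.find? (fun s => pvLen s == v) := by
  induction digits with
  | nil => simp [PySem.List.index?]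
  | cons d ds ih =>
    rw [List.map_cons]
    by_cases h : (pvLen d == v)
    · have hv : pvLen d = v := by simpa using h
      rw [hv, PySem.List.index?_cons_self]
      simp [h]
    · have hv : pvLen d ≠ v := by simpa using h
      have hb : (pvLen d == v) = false := by simpa using h
      rw [PySem.List.index?_cons_of_ne _ hv, Option.map_map]
      simp only [List.find?_cons, hb]
      rw [← ih]
      rcases PySem.List.index? (ds.map pvLen) v with _ | idx <;> rfl

-- A computes the same chain of updates, over the unsorted list
theorem pvA_chain (digits : List String) :
    build_easy_options_dict_py digits = (pvChainP digits none PySem.Dict.empty).items := by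
  have h2 := index?_map_len_eq_find? digits 2
  have h3 := index?_map_len_eq_find? digits 3
  have h4 := index?_map_len_eq_find? digits 4
  have h7 := index?_map_len_eq_find? digits 7
  unfold PySem.List.index? at h2 h3 h4 h7
  unfold build_easy_options_dict_py pvChainP pvG pvUpd PySem.List.index?
  rcases e2 : List.idxOf? (2 : Int) (List.map pvLen digits) with _ | i2 <;>
  rcases e3 : List.idxOf? (3 : Int) (List.map pvLen digits) with _ | i3 <;>
  rcases e4 : List.idxOf? (4 : Int) (List.map pvLen digits) with _ | i4 <;>
  rcases e7 : List.idxOf? (7 : Int) (List.map pvLen digits) with _ | i7 <;>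
  · rw [e2] at h2; rw [e3] at h3; rw [e4] at h4; rw [e7] at h7
    simp only [Option.map_none, Option.map_some] at h2 h3 h4 h7
    simp [e2, e3, e4, e7, ← h2, ← h3, ← h4, ← h7,
      show pvTbl.getD 2 0 = 1 from rfl, show pvTbl.getD 3 0 = 7 from rfl,
      show pvTbl.getD 4 0 = 4 from rfl, show pvTbl.getD 7 0 = 8 from rfl]

-- ===== VERDICT (by name: the statement is the Claim_ definition above) =====
theorem build_easy_options_dict_py_spec : Claim_equal_build_easy_options_dict_py := by
  intro digits _
  unfold Spec_build_easy_options_dict_py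
  rw [pvA_chain]
  unfold build_easy_options_dict_py_alt
  rw [pvFold_chain (PySem.List.sorted digits pvLen false).length _ le_rfl
      (PySem.List.sorted_pairwise digits pvLen) PySem.Dict.empty none
      (fun v hv => by injection hv),
    pvChainP_sorted]
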